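-- pv_equiv track=rewrite | github.com/olachinkei/BioReason-Pro | train_protein_grpo.py | propagate_go_ids
-- ===== SOURCE A (Python) =====
-- from typing import Any, Dict, Iterable, List, Mapping, Optional, Sequence, Tuple
--
-- def propagate_go_ids(go_ids: Iterable[str], graph: Mapping[str, Tuple[str, ...]]) -> List[str]:
--     seen = set()
--     ordered: List[str] = []
--
--     def visit(go_id: str) -> None:
--         if go_id in seen:
--             return
--         seen.add(go_id)
--         ordered.append(go_id)
--         for parent_id in graph.get(go_id, ()):
--             visit(parent_id)
--
--     for go_id in go_ids:
--         visit(go_id)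
--     return ordered
-- ===== SOURCE B (Python) =====
-- def propagate_go_ids(go_ids, graph):
--     seen = set()
--     ordered = []
--     for go_id in go_ids:
--         stack = [go_id]
--         while stack:
--             node = stack.pop()
--             if node in seen:
--                 continue
--             seen.add(node)
--             ordered.append(node)
--             stack.extend(reversed(graph.get(node, ())))
--     return ordered
-- ===== Notes on version B (the rewrite author's own statement) =====
-- stated objective: alternative
-- what changed: Replaces A's recursive visit() closure (call-stack DFS) with an explicit-stack iterative DFS that pops a node, dedups at pop time, and pushes its parents reversed, producing the identical first-visit pre-order without recursion.
import Mathlib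
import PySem

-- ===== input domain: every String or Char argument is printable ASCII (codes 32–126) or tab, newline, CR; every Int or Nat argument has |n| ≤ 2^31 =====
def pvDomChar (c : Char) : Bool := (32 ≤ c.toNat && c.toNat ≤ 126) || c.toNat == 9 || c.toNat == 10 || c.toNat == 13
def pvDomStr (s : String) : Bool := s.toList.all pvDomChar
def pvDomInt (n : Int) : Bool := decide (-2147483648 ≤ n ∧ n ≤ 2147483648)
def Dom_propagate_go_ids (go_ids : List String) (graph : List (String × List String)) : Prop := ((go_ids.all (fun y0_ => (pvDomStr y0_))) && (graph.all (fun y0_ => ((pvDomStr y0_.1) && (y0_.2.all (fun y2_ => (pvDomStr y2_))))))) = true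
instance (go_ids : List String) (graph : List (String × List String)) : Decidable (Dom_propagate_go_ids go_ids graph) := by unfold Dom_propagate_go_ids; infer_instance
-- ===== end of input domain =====

-- B replaces A's recursive visit() with an explicit-stack DFS (same pre-order); return values only, neither mutates its arguments.

-- ===== PORT A =====
-- A's recursive `visit` closure.  Python's recursion carries no fuel; the Nat fuel here is
-- only a totality guard, chosen large enough that the 0-case is never reached (proved below).
mutual
def pvVisitA (graph : List (String × List String)) :
    Nat → String → (PySem.Set String × List String) → (PySem.Set String × List String)
  | 0, _, st => st
  | f + 1, n, st =>
    if PySem.Set.contains st.1 n then st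
    else pvVisitListA graph f (PySem.Dict.getD ⟨graph⟩ n []) (PySem.Set.add st.1 n, st.2 ++ [n])

-- the `for parent_id in graph.get(go_id, ()): visit(parent_id)` loop (also A's top-level loop)
def pvVisitListA (graph : List (String × List String)) :
    Nat → List String → (PySem.Set String × List String) → (PySem.Set String × List String)
  | _, [], st => st
  | f, p :: rest, st => pvVisitListA graph f rest (pvVisitA graph f p st)
end

def propagate_go_ids (go_ids : List String) (graph : List (String × List String)) : List String :=
  (pvVisitListA graph ((go_ids ++ graph.flatMap (fun kv => kv.1 :: kv.2)).length + 1)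
    go_ids (PySem.Set.empty, [])).2

-- ===== PORT B =====
-- B's `while stack:` loop.  The stack is held top-first: Python's
-- `stack.extend(reversed(parents))` followed by `stack.pop()` is exactly prepending `parents`.
-- The Nat fuel is only a totality guard (chosen larger than the number of loop iterations).
def pvRunB (graph : List (String × List String)) :
    Nat → List String → (PySem.Set String × List String) → (PySem.Set String × List String)
  | 0, _, st => st
  | _ + 1, [], st => st
  | f + 1, n :: stk, st =>
    if PySem.Set.contains st.1 n then pvRunB graph f stk st
    else pvRunB graph f (PySem.Dict.getD ⟨graph⟩ n [] ++ stk)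
      (PySem.Set.add st.1 n, st.2 ++ [n])

def propagate_go_ids_alt (go_ids : List String) (graph : List (String × List String)) : List String :=
  (go_ids.foldl
    (fun st g => pvRunB graph (graph.foldl (fun a kv => a + kv.2.length) 0 + 2) [g] st)
    (PySem.Set.empty, [])).2

-- ===== PRECONDITION & SPEC =====
def Spec_propagate_go_ids (go_ids : List String) (graph : List (String × List String)) (out : List String) : Prop := out = propagate_go_ids_alt go_ids graph
instance (go_ids : List String) (graph : List (String × List String)) (out : List String) : Decidable (Spec_propagate_go_ids go_ids graph out) := by unfold Spec_propagate_go_ids; infer_instance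

-- ===== CLAIM (what is proved, stated in full; the proofs are below) =====
def Claim_equal_propagate_go_ids : Prop := ∀ (go_ids : List String) (graph : List (String × List String)), Dom_propagate_go_ids go_ids graph → Spec_propagate_go_ids go_ids graph (propagate_go_ids go_ids graph)

-- ===== LEMMAS AND PROOFS =====

-- number of elements of the node universe U not yet seen (A's fuel budget)
def pvCnt (U : List String) (seen : PySem.Set String) : Nat :=
  (U.filter (fun x => !(PySem.Set.contains seen x))).length

-- total parent-list mass of not-yet-seen keys (B's fuel budget; the stack part is added separately)
def pvSumUnseen (graph : List (String × List String)) (seen : PySem.Set String) : Nat :=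
  ((graph.filter (fun kv => !(PySem.Set.contains seen kv.1))).map (fun kv => kv.2.length)).sum

theorem pvCnt_le_length (U : List String) (seen : PySem.Set String) :
    pvCnt U seen ≤ U.length := by
  unfold pvCnt; exact List.length_filter_le _ _

theorem pvContains_add_self (s : PySem.Set String) (n : String) :
    PySem.Set.contains (PySem.Set.add s n) n = true := by
  have h : n ∈ PySem.Set.add s n := (PySem.Set.mem_add s n n).2 (Or.inr rfl)
  simpa [PySem.Set.contains] using h

theorem pvContains_add_of (s : PySem.Set String) (n x : String)
    (h : PySem.Set.contains s x = true) : PySem.Set.contains (PySem.Set.add s n) x = true := by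
  have hx : x ∈ s := by simpa [PySem.Set.contains] using h
  have : x ∈ PySem.Set.add s n := (PySem.Set.mem_add s n x).2 (Or.inl hx)
  simpa [PySem.Set.contains] using this


theorem pvContains_iff (s : PySem.Set String) (x : String) :
    PySem.Set.contains s x = true ↔ x ∈ s := by
  simp [PySem.Set.contains]

theorem pvMemOf (s : PySem.Set String) (x : String)
    (h : PySem.Set.contains s x = true) : x ∈ s := (pvContains_iff s x).1 h

theorem pvNotMemOf (s : PySem.Set String) (x : String)
    (h : PySem.Set.contains s x = false) : x ∉ s := by
  intro hm
  rw [(pvContains_iff s x).2 hm] at h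
  exact absurd h (by simp)

theorem pvCnt_antitone (U : List String) (s s' : PySem.Set String)
    (h : ∀ x, PySem.Set.contains s x = true → PySem.Set.contains s' x = true) :
    pvCnt U s' ≤ pvCnt U s := by
  unfold pvCnt
  refine List.Sublist.length_le (List.monotone_filter_right U ?_)
  intro x hx
  simp only [Bool.not_eq_true'] at hx ⊢
  cases hcs : PySem.Set.contains s x
  · rfl
  · rw [h x hcs] at hx
    exact absurd hx (by simp)

theorem pvCnt_add_lt (U : List String) (s : PySem.Set String) (n : String)
    (hU : n ∈ U) (hn : PySem.Set.contains s n = false) :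
    pvCnt U (PySem.Set.add s n) < pvCnt U s := by
  induction U with
  | nil => simp at hU
  | cons a U ih =>
    unfold pvCnt
    rw [List.filter_cons, List.filter_cons]
    rcases List.mem_cons.1 hU with rfl | h
    · rw [if_neg (by rw [pvContains_add_self s n]; decide), if_pos (by rw [hn]; decide)]
      have hle := pvCnt_antitone U s (PySem.Set.add s n) (fun x => pvContains_add_of s n x)
      unfold pvCnt at hle
      simp only [List.length_cons]
      omega
    · have hlt := ih h
      unfold pvCnt at hlt
      by_cases ha : PySem.Set.contains s a = true
      · rw [if_neg (by rw [pvContains_add_of s n a ha]; decide), if_neg (by rw [ha]; decide)]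
        exact hlt
      · have ha0 : PySem.Set.contains s a = false := by simpa using ha
        by_cases ha' : PySem.Set.contains (PySem.Set.add s n) a = true
        · rw [if_neg (by rw [ha']; decide), if_pos (by rw [ha0]; decide)]
          simp only [List.length_cons]; omega
        · have ha1 : PySem.Set.contains (PySem.Set.add s n) a = false := by simpa using ha'
          rw [if_pos (by rw [ha1]; decide), if_pos (by rw [ha0]; decide)]
          simp only [List.length_cons]; omega

-- dict.get(n, ()) on a cons cell
theorem pvGetD_cons (kv : String × List String) (rest : List (String × List String)) (n : String) :
    PySem.Dict.getD (⟨kv :: rest⟩ : PySem.Dict String (List String)) n [] =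
      if kv.1 == n then kv.2 else PySem.Dict.getD (⟨rest⟩ : PySem.Dict String (List String)) n [] := by
  obtain ⟨k, v⟩ := kv
  simp only [PySem.Dict.getD, PySem.Dict.get?_mk_cons]
  by_cases hk : (k == n) = true
  · simp [hk]
  · simp [hk]

theorem pvGetD_nil (n : String) :
    PySem.Dict.getD (⟨([] : List (String × List String))⟩ : PySem.Dict String (List String)) n []
      = [] := rfl

-- looked-up parents lie in the flatMap universe
theorem pvGetD_mem_flat (graph : List (String × List String)) (n p : String)
    (h : p ∈ PySem.Dict.getD (⟨graph⟩ : PySem.Dict String (List String)) n []) :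
    p ∈ graph.flatMap (fun kv => kv.1 :: kv.2) := by
  induction graph with
  | nil => rw [pvGetD_nil] at h; simp at h
  | cons kv rest ih =>
    rw [pvGetD_cons] at h
    rw [List.flatMap_cons]
    by_cases hk : (kv.1 == n) = true
    · rw [if_pos hk] at h
      exact List.mem_append.2 (Or.inl (List.mem_cons_of_mem _ h))
    · rw [if_neg hk] at h
      exact List.mem_append.2 (Or.inr (ih h))

theorem pvSumUnseen_antitone (graph : List (String × List String)) (s s' : PySem.Set String)
    (h : ∀ x, PySem.Set.contains s x = true → PySem.Set.contains s' x = true) :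
    pvSumUnseen graph s' ≤ pvSumUnseen graph s := by
  unfold pvSumUnseen
  refine List.Sublist.sum_le_sum (List.Sublist.map _ (List.monotone_filter_right graph ?_))
    (fun a _ => Nat.zero_le a)
  intro kv hkv
  simp only [Bool.not_eq_true'] at hkv ⊢
  cases hcs : PySem.Set.contains s kv.1
  · rfl
  · rw [h kv.1 hcs] at hkv
    exact absurd hkv (by simp)

-- the mass pushed when first visiting n is paid for by removing n's key entries
theorem pvSumUnseen_push (graph : List (String × List String)) (s : PySem.Set String)
    (n : String) (hn : PySem.Set.contains s n = false) :
    pvSumUnseen graph (PySem.Set.add s n)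
      + (PySem.Dict.getD (⟨graph⟩ : PySem.Dict String (List String)) n []).length
      ≤ pvSumUnseen graph s := by
  induction graph with
  | nil => rw [pvGetD_nil]; simp [pvSumUnseen]
  | cons kv rest ih =>
    rw [pvGetD_cons]
    unfold pvSumUnseen
    rw [List.filter_cons, List.filter_cons]
    by_cases hk : (kv.1 == n) = true
    · have hkd : kv.1 = n := by simpa using hk
      rw [if_pos hk, if_neg (by rw [hkd, pvContains_add_self s n]; decide),
        if_pos (by rw [hkd, hn]; decide)]
      simp only [List.map_cons, List.sum_cons]
      have hmono := pvSumUnseen_antitone rest s (PySem.Set.add s n)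
        (fun x => pvContains_add_of s n x)
      unfold pvSumUnseen at hmono
      omega
    · rw [if_neg hk]
      have ihr := ih
      unfold pvSumUnseen at ihr
      have hne : kv.1 ≠ n := fun hq => hk (by simp [hq])
      by_cases ha : PySem.Set.contains s kv.1 = true
      · rw [if_neg (by rw [pvContains_add_of s n kv.1 ha]; decide), if_neg (by rw [ha]; decide)]
        exact ihr
      · have ha0 : PySem.Set.contains s kv.1 = false := by simpa using ha
        have ha1 : PySem.Set.contains (PySem.Set.add s n) kv.1 = false := by
          cases hc : PySem.Set.contains (PySem.Set.add s n) kv.1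
          · rfl
          · exfalso
            rcases (PySem.Set.mem_add s n kv.1).1 (pvMemOf _ _ hc) with hm | hm
            · exact pvNotMemOf s kv.1 ha0 hm
            · exact hne hm
        rw [if_pos (by rw [ha1]; decide), if_pos (by rw [ha0]; decide)]
        simp only [List.map_cons, List.sum_cons]
        omega

-- `seen` only grows under A's visit
theorem pvVisitA_grows (graph : List (String × List String)) :
    ∀ f, (∀ n st x, PySem.Set.contains st.1 x = true →
            PySem.Set.contains (pvVisitA graph f n st).1 x = true)
       ∧ (∀ ps st x, PySem.Set.contains st.1 x = true →
            PySem.Set.contains (pvVisitListA graph f ps st).1 x = true) := by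
  intro f
  induction f with
  | zero =>
    constructor
    · intro n st x h
      rw [show pvVisitA graph 0 n st = st from by simp only [pvVisitA]]
      exact h
    · intro ps st x h
      induction ps generalizing st with
      | nil => rw [show pvVisitListA graph 0 [] st = st from by simp only [pvVisitListA]]; exact h
      | cons p rest ihp =>
        rw [show pvVisitListA graph 0 (p :: rest) st
              = pvVisitListA graph 0 rest (pvVisitA graph 0 p st) from by simp only [pvVisitListA]]
        exact ihp _ (by rw [show pvVisitA graph 0 p st = st from by simp only [pvVisitA]]; exact h)
  | succ f ih =>
    have hvisit : ∀ n st x, PySem.Set.contains st.1 x = true →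
        PySem.Set.contains (pvVisitA graph (f + 1) n st).1 x = true := by
      intro n st x h
      by_cases hc : PySem.Set.contains st.1 n = true
      · rw [show pvVisitA graph (f + 1) n st = st from by simp only [pvVisitA]; rw [if_pos hc]]
        exact h
      · have hc0 : PySem.Set.contains st.1 n = false := by simpa using hc
        rw [show pvVisitA graph (f + 1) n st
              = pvVisitListA graph f (PySem.Dict.getD ⟨graph⟩ n [])
                  (PySem.Set.add st.1 n, st.2 ++ [n]) from by simp only [pvVisitA]; rw [if_neg (by rw [hc0]; decide)]]
        exact ih.2 _ _ x (pvContains_add_of st.1 n x h)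
    refine ⟨hvisit, ?_⟩
    intro ps st x h
    induction ps generalizing st with
    | nil => rw [show pvVisitListA graph (f + 1) [] st = st from by simp only [pvVisitListA]]; exact h
    | cons p rest ihp =>
      rw [show pvVisitListA graph (f + 1) (p :: rest) st
            = pvVisitListA graph (f + 1) rest (pvVisitA graph (f + 1) p st) from by
          simp only [pvVisitListA]]
      exact ihp _ (hvisit p st x h)

-- fuel irrelevance for A's recursion: any two fuels above the unseen count agree
theorem pvIrrelA (graph : List (String × List String)) (U : List String)
    (hU : ∀ n p, p ∈ PySem.Dict.getD (⟨graph⟩ : PySem.Dict String (List String)) n [] → p ∈ U) :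
    ∀ k, (∀ f g n st, f + g ≤ k → n ∈ U → pvCnt U st.1 < f → pvCnt U st.1 < g →
            pvVisitA graph f n st = pvVisitA graph g n st)
       ∧ (∀ f g ps st, f + g ≤ k → (∀ p ∈ ps, p ∈ U) → pvCnt U st.1 < f → pvCnt U st.1 < g →
            pvVisitListA graph f ps st = pvVisitListA graph g ps st) := by
  intro k
  induction k using Nat.strong_induction_on with
  | _ k IH =>
    have hv : ∀ f g n st, f + g ≤ k → n ∈ U → pvCnt U st.1 < f → pvCnt U st.1 < g →
        pvVisitA graph f n st = pvVisitA graph g n st := by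
      intro f g n st hk hn hf hg
      cases f with
      | zero => omega
      | succ f =>
        cases g with
        | zero => omega
        | succ g =>
          by_cases hc : PySem.Set.contains st.1 n = true
          · rw [show pvVisitA graph (f + 1) n st = st from by simp only [pvVisitA]; rw [if_pos hc],
              show pvVisitA graph (g + 1) n st = st from by simp only [pvVisitA]; rw [if_pos hc]]
          · have hc0 : PySem.Set.contains st.1 n = false := by simpa using hc
            rw [show pvVisitA graph (f + 1) n st
                  = pvVisitListA graph f (PySem.Dict.getD ⟨graph⟩ n [])
                      (PySem.Set.add st.1 n, st.2 ++ [n]) from by simp only [pvVisitA]; rw [if_neg (by rw [hc0]; decide)],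
              show pvVisitA graph (g + 1) n st
                  = pvVisitListA graph g (PySem.Dict.getD ⟨graph⟩ n [])
                      (PySem.Set.add st.1 n, st.2 ++ [n]) from by simp only [pvVisitA]; rw [if_neg (by rw [hc0]; decide)]]
            have hcnt : pvCnt U (PySem.Set.add st.1 n) < pvCnt U st.1 :=
              pvCnt_add_lt U st.1 n hn hc0
            exact (IH (f + g) (by omega)).2 f g _ (PySem.Set.add st.1 n, st.2 ++ [n])
              (by omega) (fun p hp => hU n p hp)
              (show pvCnt U (PySem.Set.add st.1 n) < f by omega)
              (show pvCnt U (PySem.Set.add st.1 n) < g by omega)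
    refine ⟨hv, ?_⟩
    intro f g ps
    induction ps with
    | nil =>
      intro st _ _ _ _
      rw [show pvVisitListA graph f [] st = st from by simp only [pvVisitListA],
        show pvVisitListA graph g [] st = st from by simp only [pvVisitListA]]
    | cons p rest ihp =>
      intro st hk hmem hf hg
      rw [show pvVisitListA graph f (p :: rest) st
            = pvVisitListA graph f rest (pvVisitA graph f p st) from by simp only [pvVisitListA],
        show pvVisitListA graph g (p :: rest) st
            = pvVisitListA graph g rest (pvVisitA graph g p st) from by simp only [pvVisitListA]]
      rw [hv f g p st hk (hmem p (by simp)) hf hg]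
      have hle : pvCnt U (pvVisitA graph g p st).1 ≤ pvCnt U st.1 :=
        pvCnt_antitone U st.1 _ (fun x hx => (pvVisitA_grows graph g).1 p st x hx)
      exact ihp _ hk (fun q hq => hmem q (by simp [hq])) (by omega) (by omega)

-- visiting an appended worklist = visiting the two halves in order
theorem pvVisitListA_append (graph : List (String × List String)) (f : Nat)
    (xs ys : List String) (st : PySem.Set String × List String) :
    pvVisitListA graph f (xs ++ ys) st
      = pvVisitListA graph f ys (pvVisitListA graph f xs st) := by
  induction xs generalizing st with
  | nil =>
    rw [List.nil_append, show pvVisitListA graph f [] st = st from by simp only [pvVisitListA]]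
  | cons x xs ih =>
    rw [List.cons_append,
      show pvVisitListA graph f (x :: (xs ++ ys)) st
          = pvVisitListA graph f (xs ++ ys) (pvVisitA graph f x st) from by simp only [pvVisitListA],
      show pvVisitListA graph f (x :: xs) st
          = pvVisitListA graph f xs (pvVisitA graph f x st) from by simp only [pvVisitListA],
      ih]

-- THE BRIDGE: B's stack machine computes A's left-to-right DFS of its stack
theorem pvBridge (graph : List (String × List String)) (U : List String)
    (hU : ∀ n p, p ∈ PySem.Dict.getD (⟨graph⟩ : PySem.Dict String (List String)) n [] → p ∈ U) :
    ∀ c stack st f g, pvCnt U st.1 ≤ c → (∀ x ∈ stack, x ∈ U) → pvCnt U st.1 < f →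
      stack.length + pvSumUnseen graph st.1 < g →
      pvRunB graph g stack st = pvVisitListA graph f stack st := by
  intro c
  induction c using Nat.strong_induction_on with
  | _ c IH =>
    intro stack
    induction stack with
    | nil =>
      intro st f g _ _ _ hg
      cases g with
      | zero => simp at hg
      | succ g => simp only [pvRunB, pvVisitListA]
    | cons n stk ih =>
      intro st f g hc hmem hf hg
      cases f with
      | zero => omega
      | succ f =>
        cases g with
        | zero => omega
        | succ g =>
          by_cases hcn : PySem.Set.contains st.1 n = true
          · rw [show pvRunB graph (g + 1) (n :: stk) st = pvRunB graph g stk st from by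
                simp only [pvRunB]; rw [if_pos hcn],
              show pvVisitListA graph (f + 1) (n :: stk) st
                  = pvVisitListA graph (f + 1) stk (pvVisitA graph (f + 1) n st) from by
                simp only [pvVisitListA],
              show pvVisitA graph (f + 1) n st = st from by simp only [pvVisitA]; rw [if_pos hcn]]
            exact ih st (f + 1) g hc (fun x hx => hmem x (by simp [hx])) hf
              (by simp only [List.length_cons] at hg; omega)
          · have hcn0 : PySem.Set.contains st.1 n = false := by simpa using hcn
            have hnU : n ∈ U := hmem n (by simp)
            have hcnt : pvCnt U (PySem.Set.add st.1 n) < pvCnt U st.1 :=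
              pvCnt_add_lt U st.1 n hnU hcn0
            have hpush := pvSumUnseen_push graph st.1 n hcn0
            have hmem' : ∀ x ∈ PySem.Dict.getD (⟨graph⟩ : PySem.Dict String (List String)) n []
                ++ stk, x ∈ U := by
              intro x hx
              rcases List.mem_append.1 hx with h | h
              · exact hU n x h
              · exact hmem x (by simp [h])
            have hbr := IH (c - 1) (by omega)
              (PySem.Dict.getD ⟨graph⟩ n [] ++ stk) (PySem.Set.add st.1 n, st.2 ++ [n])
              (f + 1) g
              (show pvCnt U (PySem.Set.add st.1 n) ≤ c - 1 by omega)
              hmem'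
              (show pvCnt U (PySem.Set.add st.1 n) < f + 1 by omega)
              (by
                show (PySem.Dict.getD (⟨graph⟩ : PySem.Dict String (List String)) n []
                    ++ stk).length + pvSumUnseen graph (PySem.Set.add st.1 n) < g
                rw [List.length_append]
                simp only [List.length_cons] at hg
                omega)
            rw [show pvRunB graph (g + 1) (n :: stk) st
                  = pvRunB graph g (PySem.Dict.getD ⟨graph⟩ n [] ++ stk)
                      (PySem.Set.add st.1 n, st.2 ++ [n]) from by simp only [pvRunB]; rw [if_neg (by rw [hcn0]; decide)],
              show pvVisitListA graph (f + 1) (n :: stk) st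
                  = pvVisitListA graph (f + 1) stk (pvVisitA graph (f + 1) n st) from by
                simp only [pvVisitListA],
              show pvVisitA graph (f + 1) n st
                  = pvVisitListA graph f (PySem.Dict.getD ⟨graph⟩ n [])
                      (PySem.Set.add st.1 n, st.2 ++ [n]) from by simp only [pvVisitA]; rw [if_neg (by rw [hcn0]; decide)],
              hbr, pvVisitListA_append]
            congr 1
            exact ((pvIrrelA graph U hU ((f + 1) + f)).2 (f + 1) f _
              (PySem.Set.add st.1 n, st.2 ++ [n]) (by omega) (fun p hp => hU n p hp)
              (show pvCnt U (PySem.Set.add st.1 n) < f + 1 by omega)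
              (show pvCnt U (PySem.Set.add st.1 n) < f by omega))

-- B's literal fuel expression computes the total parent mass
theorem pvFoldl_len (graph : List (String × List String)) (a : Nat) :
    graph.foldl (fun a kv => a + kv.2.length) a
      = a + (graph.map (fun kv => kv.2.length)).sum := by
  induction graph generalizing a with
  | nil => simp
  | cons kv rest ih => simp only [List.foldl_cons, List.map_cons, List.sum_cons, ih]; omega

theorem pvSumUnseen_le (graph : List (String × List String)) (s : PySem.Set String) :
    pvSumUnseen graph s ≤ (graph.map (fun kv => kv.2.length)).sum := by
  unfold pvSumUnseen
  exact List.Sublist.sum_le_sum (List.Sublist.map _ List.filter_sublist) (fun a _ => Nat.zero_le a)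

-- ===== VERDICT (by name: the statement is the Claim_ definition above) =====
theorem propagate_go_ids_spec : Claim_equal_propagate_go_ids := by
  intro go_ids graph _
  unfold Spec_propagate_go_ids propagate_go_ids propagate_go_ids_alt
  set U := go_ids ++ graph.flatMap (fun kv => kv.1 :: kv.2) with hUdef
  have hU : ∀ n p, p ∈ PySem.Dict.getD (⟨graph⟩ : PySem.Dict String (List String)) n []
      → p ∈ U := by
    intro n p hp
    exact List.mem_append.2 (Or.inr (pvGetD_mem_flat graph n p hp))
  suffices h : ∀ ids st, (∀ x ∈ ids, x ∈ U) →
      ids.foldl (fun st g => pvRunB graph (graph.foldl (fun a kv => a + kv.2.length) 0 + 2) [g] st) st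
        = pvVisitListA graph (U.length + 1) ids st by
    rw [h go_ids (PySem.Set.empty, []) (fun x hx => List.mem_append.2 (Or.inl hx))]
  intro ids
  induction ids with
  | nil =>
    intro st _
    rw [List.foldl_nil, show pvVisitListA graph (U.length + 1) [] st = st from by
      simp only [pvVisitListA]]
  | cons gid rest ih =>
    intro st hmem
    have hone : pvRunB graph (graph.foldl (fun a kv => a + kv.2.length) 0 + 2) [gid] st
        = pvVisitA graph (U.length + 1) gid st := by
      have hb := pvBridge graph U hU (pvCnt U st.1) [gid] st (U.length + 1)
        (graph.foldl (fun a kv => a + kv.2.length) 0 + 2)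
        le_rfl
        (by intro y hy; simp at hy; rw [hy]; exact hmem gid (by simp))
        (by have := pvCnt_le_length U st.1; omega)
        (by
          rw [pvFoldl_len]
          have hle := pvSumUnseen_le graph st.1
          simp only [List.length_cons, List.length_nil]
          omega)
      rw [hb,
        show pvVisitListA graph (U.length + 1) [gid] st
            = pvVisitListA graph (U.length + 1) [] (pvVisitA graph (U.length + 1) gid st) from by
          simp only [pvVisitListA],
        show pvVisitListA graph (U.length + 1) []
            (pvVisitA graph (U.length + 1) gid st)
            = pvVisitA graph (U.length + 1) gid st from by simp only [pvVisitListA]]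
    rw [show pvVisitListA graph (U.length + 1) (gid :: rest) st
          = pvVisitListA graph (U.length + 1) rest (pvVisitA graph (U.length + 1) gid st) from by
        simp only [pvVisitListA]]
    simp only [List.foldl_cons]
    rw [hone]
    exact ih _ (fun x hx => hmem x (by simp [hx]))
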